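-- pv_equiv track=rewrite | github.com/inrae/MSpangepop | workflow/scripts/sort_vcf_header.py | parse_vcf_header
-- ===== SOURCE A (Python) =====
-- def parse_vcf_header(vcf_header):
--     """
--     Parses the VCF header to extract general info, contigs, and sorts contigs.
--
--     :param vcf_header: str, the VCF header as a string.
--     :return: list, containing combined lines of parsed results.
--     """
--
--     lines = vcf_header.strip().split('\n')
--
--     first_part = []
--     contigs = []
--     second_part = []
--
--     start = True
--     for line in lines:
--         if line.startswith("##contig"):
--             contigs.append(line)
--             start = False
--         elif start:
--             first_part.append(line)
--         else:
--             second_part.append(line)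
--
--     def sort_key(contig_line):
--         """
--         Sorting key function to prioritize and order contigs:
--         - Highest priority for contigs starting with ".".
--         - Numerical sorting for digit-only IDs (e.g., chromosomes).
--         - Lexicographic sorting for alphabetic IDs.
--         """
--         try:
--             contig_id = contig_line.split('<ID=')[1].split(',')[0]
--         except IndexError:
--             contig_id = ""
--
--         if contig_id.startswith("."):
--             return (0, contig_id)
--         elif contig_id.isdigit():
--             return (2, int(contig_id))
--         else:
--             return (1, contig_id)
--
--     sorted_contigs = sorted(contigs, key=sort_key)
--
--     combined_lines = first_part + sorted_contigs + second_part
--     return combined_lines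
-- ===== SOURCE B (Python) =====
-- def parse_vcf_header(vcf_header):
--     """One decorated stable sort of all header lines (schwartzian transform) instead of partition-then-sort."""
--     lines = vcf_header.strip().split('\n')
--
--     idx = len(lines)
--     for i, line in enumerate(lines):
--         if line.startswith("##contig"):
--             idx = i
--             break
--
--     def key(pair):
--         i, line = pair
--         if not line.startswith("##contig"):
--             return (i, -1, 0, "", i)
--         try:
--             contig_id = line.split('<ID=')[1].split(',')[0]
--         except IndexError:
--             contig_id = ""
--         if contig_id.startswith("."):
--             return (idx, 0, 0, contig_id, i)
--         elif contig_id.isdigit():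
--             return (idx, 2, int(contig_id), "", i)
--         else:
--             return (idx, 1, 0, contig_id, i)
--
--     return [line for _, line in sorted(enumerate(lines), key=key)]
-- ===== Notes on version B (the rewrite author's own statement) =====
-- stated objective: alternative
-- what changed: Replaced A's three-list flag-loop partition followed by a sort of the contig block with a single decorated stable sort (schwartzian transform) of all enumerated header lines under one composite key (position for non-contig lines; first-contig position, contig priority/id and index tiebreak for contig lines) — the partition into first_part/contigs/second_part disappears.
import Mathlib
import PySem

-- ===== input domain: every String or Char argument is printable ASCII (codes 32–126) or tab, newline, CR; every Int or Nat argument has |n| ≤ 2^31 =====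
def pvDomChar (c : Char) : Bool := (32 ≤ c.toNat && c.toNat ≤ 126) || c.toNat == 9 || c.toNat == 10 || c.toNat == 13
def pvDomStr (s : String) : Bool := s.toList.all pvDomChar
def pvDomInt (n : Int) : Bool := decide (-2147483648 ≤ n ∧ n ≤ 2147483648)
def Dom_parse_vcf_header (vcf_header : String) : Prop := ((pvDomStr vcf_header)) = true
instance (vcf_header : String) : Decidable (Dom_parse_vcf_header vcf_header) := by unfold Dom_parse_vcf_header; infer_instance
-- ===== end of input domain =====

-- B replaces A's partition-into-three-then-sort by ONE decorated stable sort of all enumerated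
-- header lines under a composite key (objective: alternative algorithm, same cost).

-- ===== PORT A =====
-- the test line.startswith("##contig"), named once and used by both ports
def pvIsContig (l : String) : Bool := PySem.Str.startswith l "##contig"

-- contig_line.split('<ID=')[1].split(',')[0], IndexError (no '<ID=') caught → "";
-- identical extraction code in A's sort_key and B's key, hence one shared helper
def pvContigId (contig_line : String) : String :=
  match PySem.List.pyGet? ((PySem.Str.split? contig_line "<ID=").getD []) 1 with
  | none => ""
  | some t => ((PySem.Str.split? t ",").getD []).headD ""   -- [0]: split result is never empty

-- A's sort_key: Python returns (0|1, str) or (2, int); same-priority comparisons are homogeneous,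
-- so the heterogeneous tuple is encoded exactly as the lexicographic triple (priority, int-or-0, str-or-""),
-- ported through sorted2's two key slots k1 = (priority, int-or-0), k2 = str-or-"" (identical comparison)
def pvSortKeyA1 (contig_line : String) : Int ×ₗ Int :=
  if PySem.Str.startswith (pvContigId contig_line) "." then toLex (0, 0)
  else if PySem.Str.strIsdigit (pvContigId contig_line) then
    toLex (2, (PySem.Int.ofStr? (pvContigId contig_line)).getD 0)
  else toLex (1, 0)

def pvSortKeyA2 (contig_line : String) : String :=
  if PySem.Str.startswith (pvContigId contig_line) "." then pvContigId contig_line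
  else if PySem.Str.strIsdigit (pvContigId contig_line) then ""
  else pvContigId contig_line

-- the body of A's for-loop (three accumulators + the 'start' flag)
def pvStepA (acc : List String × List String × List String × Bool) (line : String) :
    List String × List String × List String × Bool :=
  if pvIsContig line then (acc.1, acc.2.1 ++ [line], acc.2.2.1, false)
  else if acc.2.2.2 then (acc.1 ++ [line], acc.2.1, acc.2.2.1, acc.2.2.2)
  else (acc.1, acc.2.1, acc.2.2.1 ++ [line], acc.2.2.2)

def parse_vcf_header (vcf_header : String) : List String :=
  let lines := (PySem.Str.split? (PySem.Str.strip vcf_header) "\n").getD []  -- sep "\n" ≠ "": never none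
  let st := lines.foldl pvStepA ([], [], [], true)
  st.1 ++ PySem.List.sorted2 st.2.1 pvSortKeyA1 pvSortKeyA2 false ++ st.2.2.1

-- ===== PORT B =====
-- B's first loop: idx = len(lines); for i, line in enumerate(lines): if startswith: idx = i; break
def pvContigIdx : List String → Nat
  | [] => 0
  | l :: t => if pvIsContig l then 0 else pvContigIdx t + 1

-- B's key over enumerated pairs: Python returns a homogeneous 5-tuple (int, int, int, str, int),
-- ported through sorted2's two key slots k1 = first three components, k2 = last two (identical comparison)
def pvKeyB1 (idx : Int) (p : Int × String) : Int ×ₗ Int ×ₗ Int :=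
  if !pvIsContig p.2 then toLex (p.1, toLex (-1, 0))
  else if PySem.Str.startswith (pvContigId p.2) "." then toLex (idx, toLex (0, 0))
  else if PySem.Str.strIsdigit (pvContigId p.2) then
    toLex (idx, toLex (2, (PySem.Int.ofStr? (pvContigId p.2)).getD 0))
  else toLex (idx, toLex (1, 0))

def pvKeyB2 (p : Int × String) : String ×ₗ Int :=
  if !pvIsContig p.2 then toLex ("", p.1)
  else if PySem.Str.startswith (pvContigId p.2) "." then toLex (pvContigId p.2, p.1)
  else if PySem.Str.strIsdigit (pvContigId p.2) then toLex ("", p.1)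
  else toLex (pvContigId p.2, p.1)

def parse_vcf_header_alt (vcf_header : String) : List String :=
  let lines := (PySem.Str.split? (PySem.Str.strip vcf_header) "\n").getD []  -- sep "\n" ≠ "": never none
  let idx : Int := (pvContigIdx lines : Int)   -- loop leaves idx = len(lines) if no contig line
  (PySem.List.sorted2 (PySem.List.enumerate lines 0) (pvKeyB1 idx) pvKeyB2 false).map Prod.snd

-- ===== PRECONDITION & SPEC =====
def Spec_parse_vcf_header (vcf_header : String) (out : List String) : Prop := out = parse_vcf_header_alt vcf_header
instance (vcf_header : String) (out : List String) : Decidable (Spec_parse_vcf_header vcf_header out) := by unfold Spec_parse_vcf_header; infer_instance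

-- ===== CLAIM (what is proved, stated in full; the proofs are below) =====
def Claim_equal_parse_vcf_header : Prop := ∀ (vcf_header : String), Dom_parse_vcf_header vcf_header → Spec_parse_vcf_header vcf_header (parse_vcf_header vcf_header)

-- ===== LEMMAS AND PROOFS =====

-- proof-side view of the two-slot sorted2 keys as single lexicographic keys
def pvSortKey (contig_line : String) : (Int ×ₗ Int) ×ₗ String :=
  toLex (pvSortKeyA1 contig_line, pvSortKeyA2 contig_line)

def pvKeyB (idx : Int) (p : Int × String) : (Int ×ₗ Int ×ₗ Int) ×ₗ (String ×ₗ Int) :=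
  toLex (pvKeyB1 idx p, pvKeyB2 p)

-- sorted2's pair of key slots is sorted under the corresponding lexicographic key
theorem pvSorted2_eq_sorted {α κ₁ κ₂ : Type} [LinearOrder κ₁] [LinearOrder κ₂]
    (xs : List α) (k1 : α → κ₁) (k2 : α → κ₂) :
    PySem.List.sorted2 xs k1 k2 false
      = PySem.List.sorted xs (fun x => (toLex (k1 x, k2 x) : κ₁ ×ₗ κ₂)) false := by
  rw [PySem.List.sorted_eq_foldl_insertBy]
  unfold PySem.List.sorted2
  simp only [Bool.false_eq_true, if_false]
  have hbef : (fun a b => decide (k1 a < k1 b) || (!decide (k1 b < k1 a) && decide (k2 a < k2 b)))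
      = (fun a b => decide ((toLex (k1 a, k2 a) : κ₁ ×ₗ κ₂) < toLex (k1 b, k2 b))) := by
    funext a b
    by_cases h1 : k1 a < k1 b
    · simp [h1, Prod.Lex.toLex_lt_toLex]
    · by_cases h2 : k1 b < k1 a
      · simp [h1, h2, Prod.Lex.toLex_lt_toLex, ne_of_gt h2]
      · have he : k1 a = k1 b := le_antisymm (not_lt.mp h2) (not_lt.mp h1)
        by_cases h3 : k2 a < k2 b <;>
          simp [h3, he, Prod.Lex.toLex_lt_toLex]
  rw [hbef]

-- ---- A-side characterization (the flag loop splits at the first contig line) ----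

theorem pvLoop_false (ls : List String) : ∀ (fp cs sp : List String),
    ls.foldl pvStepA (fp, cs, sp, false) =
      (fp, cs ++ ls.filter (fun l => pvIsContig l),
       sp ++ ls.filter (fun l => !pvIsContig l), false) := by
  induction ls with
  | nil => simp
  | cons l t ih =>
    intro fp cs sp
    by_cases h : pvIsContig l = true <;>
      simp [pvStepA, h, ih]

theorem pvLoop_true (ls : List String) : ∀ (fp : List String),
    ls.foldl pvStepA (fp, [], [], true) =
      (fp ++ ls.takeWhile (fun l => !pvIsContig l),
       ls.filter (fun l => pvIsContig l),
       (ls.dropWhile (fun l => !pvIsContig l)).filter (fun l => !pvIsContig l),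
       ls.all (fun l => !pvIsContig l)) := by
  induction ls with
  | nil => simp
  | cons l t ih =>
    intro fp
    by_cases h : pvIsContig l = true
    · simp [pvStepA, h, pvLoop_false]
    · simpa [pvStepA, h, List.filter_cons, List.takeWhile_cons, List.dropWhile_cons] using ih (fp ++ [l])

-- ---- pvContigIdx: the boundary index ----

theorem pvContigIdx_le (ls : List String) : pvContigIdx ls ≤ ls.length := by
  induction ls with
  | nil => simp [pvContigIdx]
  | cons l t ih =>
    by_cases h : pvIsContig l = true
    · simp [pvContigIdx, h]
    · simp [pvContigIdx, h]
      omega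

theorem pvContigIdx_take (ls : List String) :
    ls.take (pvContigIdx ls) = ls.takeWhile (fun l => !pvIsContig l) := by
  induction ls with
  | nil => rfl
  | cons l t ih =>
    by_cases h : pvIsContig l = true <;> simp [pvContigIdx, h, ih]

theorem pvContigIdx_drop (ls : List String) :
    ls.drop (pvContigIdx ls) = ls.dropWhile (fun l => !pvIsContig l) := by
  induction ls with
  | nil => rfl
  | cons l t ih =>
    by_cases h : pvIsContig l = true <;> simp [pvContigIdx, h, ih]

theorem pvContigIdx_drop_head (ls : List String) : ∀ (x : String) (t : List String),
    ls.drop (pvContigIdx ls) = x :: t → pvIsContig x = true := by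
  induction ls with
  | nil => intro x t h; simp [pvContigIdx] at h
  | cons l ls ih =>
    intro x t h
    by_cases hl : pvIsContig l = true
    · simp [pvContigIdx, hl] at h
      exact h.1 ▸ hl
    · rw [show pvContigIdx (l :: ls) = pvContigIdx ls + 1 by simp [pvContigIdx, hl],
        List.drop_succ_cons] at h
      exact ih x t h

theorem pvFilter_dropWhile (ls : List String) :
    (ls.dropWhile (fun l => !pvIsContig l)).filter (fun l => pvIsContig l) =
      ls.filter (fun l => pvIsContig l) := by
  induction ls with
  | nil => rfl
  | cons l t ih =>
    by_cases h : pvIsContig l = true <;> simp [h, ih]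

-- ---- small list facts specific to the enumerated view ----
theorem pvMapSndFilter (l : List (Int × String)) (p : String → Bool) :
    (l.filter (fun x => p x.2)).map Prod.snd = (l.map Prod.snd).filter p := by
  induction l with
  | nil => rfl
  | cons x t ih =>
    by_cases h : p x.2 = true <;> simp [h, ih]

-- ---- key shapes ----

def pvPrio (s : String) : Int :=
  if PySem.Str.startswith (pvContigId s) "." then 0
  else if PySem.Str.strIsdigit (pvContigId s) then 2 else 1

def pvNum (s : String) : Int :=
  if PySem.Str.startswith (pvContigId s) "." then 0
  else if PySem.Str.strIsdigit (pvContigId s) then (PySem.Int.ofStr? (pvContigId s)).getD 0 else 0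

def pvCidSlot (s : String) : String :=
  if PySem.Str.startswith (pvContigId s) "." then pvContigId s
  else if PySem.Str.strIsdigit (pvContigId s) then "" else pvContigId s

theorem pvSortKey_eq (s : String) :
    pvSortKey s = toLex (toLex (pvPrio s, pvNum s), pvCidSlot s) := by
  unfold pvSortKey pvSortKeyA1 pvSortKeyA2 pvPrio pvNum pvCidSlot
  split_ifs <;> rfl

theorem pvKeyB_contig (idx : Int) (p : Int × String) (h : pvIsContig p.2 = true) :
    pvKeyB idx p = toLex (toLex (idx, toLex (pvPrio p.2, pvNum p.2)), toLex (pvCidSlot p.2, p.1)) := by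
  unfold pvKeyB pvKeyB1 pvKeyB2 pvPrio pvNum pvCidSlot
  simp only [h, Bool.not_true, Bool.false_eq_true, if_false]
  split_ifs <;> rfl

theorem pvKeyB_noncontig (idx : Int) (p : Int × String) (h : pvIsContig p.2 = false) :
    pvKeyB idx p = toLex (toLex (p.1, toLex (-1, 0)), toLex ("", p.1)) := by
  unfold pvKeyB pvKeyB1 pvKeyB2
  simp [h]

-- comparing two contig keys whose index tiebreak cannot fire is comparing A's sort keys
theorem pvCmp_eq (idx : Int) (p q : Int × String)
    (hp : pvIsContig p.2 = true) (hq : pvIsContig q.2 = true) (hij : q.1 < p.1) :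
    decide (pvKeyB idx p < pvKeyB idx q) = decide (pvSortKey p.2 < pvSortKey q.2) := by
  rw [pvKeyB_contig idx p hp, pvKeyB_contig idx q hq, pvSortKey_eq, pvSortKey_eq]
  apply decide_eq_decide.mpr
  have hnp : ¬ (p.1 < q.1) := by omega
  constructor
  · intro h
    rcases Prod.Lex.toLex_lt_toLex.mp h with h1 | ⟨he, h2⟩
    · rcases Prod.Lex.toLex_lt_toLex.mp h1 with h1a | ⟨-, hA⟩
      · exact absurd h1a (lt_irrefl _)
      · exact Prod.Lex.toLex_lt_toLex.mpr (Or.inl hA)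
    · have hAeq : toLex (pvPrio p.2, pvNum p.2) = toLex (pvPrio q.2, pvNum q.2) :=
        congrArg Prod.snd (toLex_inj.mp he)
      rcases Prod.Lex.toLex_lt_toLex.mp h2 with hc | ⟨-, hij2⟩
      · exact Prod.Lex.toLex_lt_toLex.mpr (Or.inr ⟨hAeq, hc⟩)
      · exact absurd hij2 hnp
  · intro h
    rcases Prod.Lex.toLex_lt_toLex.mp h with hA | ⟨hAeq, hc⟩
    · exact Prod.Lex.toLex_lt_toLex.mpr
        (Or.inl (Prod.Lex.toLex_lt_toLex.mpr (Or.inr ⟨rfl, hA⟩)))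
    · exact Prod.Lex.toLex_lt_toLex.mpr
        (Or.inr ⟨congrArg (fun z => toLex (idx, z)) hAeq,
          Prod.Lex.toLex_lt_toLex.mpr (Or.inl hc)⟩)

-- two equal contig keys force equal indices
theorem pvKeyB_contig_inj (idx : Int) (p q : Int × String)
    (hp : pvIsContig p.2 = true) (hq : pvIsContig q.2 = true)
    (h : pvKeyB idx p = pvKeyB idx q) : p.1 = q.1 := by
  rw [pvKeyB_contig idx p hp, pvKeyB_contig idx q hq] at h
  simp only [toLex_inj, Prod.mk.injEq] at h
  exact h.2.2

-- ---- stability: decorated insertion = plain insertion on the second components ----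

theorem pvInsDec (idx : Int) (p : Int × String) : ∀ (acc : List (Int × String)),
    (∀ q ∈ acc, decide (pvKeyB idx p < pvKeyB idx q) = decide (pvSortKey p.2 < pvSortKey q.2)) →
    (PySem.List.insertBy (fun x y => decide (pvKeyB idx x < pvKeyB idx y)) p acc).map Prod.snd
      = PySem.List.insertBy (fun x y => decide (pvSortKey x < pvSortKey y)) p.2 (acc.map Prod.snd) := by
  intro acc
  induction acc with
  | nil => intro _; simp [PySem.List.insertBy]
  | cons q t ih =>
    intro h
    have hq := h q (by simp)
    by_cases hb : pvSortKey p.2 < pvSortKey q.2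
    · have h1 : decide (pvKeyB idx p < pvKeyB idx q) = true := by
        rw [hq]; exact decide_eq_true hb
      simp [PySem.List.insertBy, h1, hb]
    · have h1 : decide (pvKeyB idx p < pvKeyB idx q) = false := by
        rw [hq]; exact decide_eq_false hb
      simp [PySem.List.insertBy, h1, hb, ih (fun r hr => h r (by simp [hr]))]

theorem pvFoldDec (idx : Int) : ∀ (ps acc : List (Int × String)),
    (∀ q ∈ acc, pvIsContig q.2 = true) → (∀ p ∈ ps, pvIsContig p.2 = true) →
    (∀ q ∈ acc, ∀ p ∈ ps, q.1 < p.1) → ps.Pairwise (fun p q => p.1 < q.1) →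
    (ps.foldl (fun a p => PySem.List.insertBy (fun x y => decide (pvKeyB idx x < pvKeyB idx y)) p a) acc).map Prod.snd
      = ps.foldl (fun a p => PySem.List.insertBy (fun x y => decide (pvSortKey x < pvSortKey y)) p.2 a) (acc.map Prod.snd) := by
  intro ps
  induction ps with
  | nil => intro acc _ _ _ _; simp
  | cons p t ih =>
    intro acc hacc hps hlt hpw
    simp only [List.foldl_cons]
    have hmap : (PySem.List.insertBy (fun x y => decide (pvKeyB idx x < pvKeyB idx y)) p acc).map Prod.snd
        = PySem.List.insertBy (fun x y => decide (pvSortKey x < pvSortKey y)) p.2 (acc.map Prod.snd) := by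
      apply pvInsDec
      intro q hq
      exact pvCmp_eq idx p q (hps p (by simp)) (hacc q hq) (hlt q hq p (by simp))
    rw [← hmap]
    apply ih
    · intro q hq
      rcases (PySem.List.mem_insertBy _ _ _ _).mp hq with h | h
      · exact h ▸ hps p (by simp)
      · exact hacc q h
    · intro r hr; exact hps r (by simp [hr])
    · intro q hq r hr
      rcases (PySem.List.mem_insertBy _ _ _ _).mp hq with h | h
      · subst h
        exact (List.pairwise_cons.mp hpw).1 r hr
      · exact hlt q h r (by simp [hr])
    · exact (List.pairwise_cons.mp hpw).2

-- ===== the main argument =====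

theorem pvMain (lines : List String) :
    (PySem.List.sorted (PySem.List.enumerate lines 0)
        (pvKeyB ((pvContigIdx lines : Nat) : Int)) false).map Prod.snd
      = lines.takeWhile (fun l => !pvIsContig l)
        ++ PySem.List.sorted (lines.filter (fun l => pvIsContig l)) pvSortKey false
        ++ (lines.dropWhile (fun l => !pvIsContig l)).filter (fun l => !pvIsContig l) := by
  set n := pvContigIdx lines with hn
  have hnle : n ≤ lines.length := pvContigIdx_le lines
  -- enumerated pieces
  set Efp := PySem.List.enumerate (lines.take n) 0 with hEfp
  set Et := PySem.List.enumerate (lines.drop n) (n : Int) with hEt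
  set cp := Et.filter (fun p => pvIsContig p.2) with hcp
  set sp := Et.filter (fun p => !pvIsContig p.2) with hsp
  set C := PySem.List.sorted cp (pvKeyB (n : Int)) false with hC
  -- E splits as Efp ++ Et
  have hsplit : PySem.List.enumerate lines 0 = Efp ++ Et := by
    conv_lhs => rw [← List.take_append_drop n lines]
    rw [PySem.List.enumerate_append]
    congr 2
    simp [List.length_take, Nat.min_eq_left hnle]
  -- membership facts
  have hall : ∀ x ∈ lines.take n, pvIsContig x = false := by
    rw [hn, pvContigIdx_take]
    intro x hx
    have := List.mem_takeWhile_imp hx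
    simpa using this
  have hEfp_mem : ∀ p ∈ Efp, pvIsContig p.2 = false ∧ 0 ≤ p.1 ∧ p.1 < (n : Int) := by
    intro p hp
    rcases (PySem.List.mem_enumerate_iff _ _ _).mp hp with ⟨k, hk, rfl⟩
    have hklen : k < n := lt_of_lt_of_le hk (by simp [List.length_take])
    refine ⟨hall _ (List.getElem_mem _), by simp, ?_⟩
    show (0 : Int) + k < (n : Int)
    omega
  have hEt_mem : ∀ p ∈ Et, (n : Int) ≤ p.1 ∧ (pvIsContig p.2 = false → (n : Int) < p.1) := by
    intro p hp
    rcases (PySem.List.mem_enumerate_iff _ _ _).mp hp with ⟨k, hk, rfl⟩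
    refine ⟨by show (n : Int) ≤ (n : Int) + k; omega, ?_⟩
    intro hnc
    by_cases hk0 : k = 0
    · exfalso
      subst hk0
      obtain ⟨a, t, hat⟩ := List.exists_cons_of_ne_nil
        (List.ne_nil_of_length_pos hk : lines.drop n ≠ [])
      have ha : pvIsContig a = true := pvContigIdx_drop_head lines a t (by rw [← hn]; exact hat)
      have h0 : (lines.drop n)[0] = a := by simp [hat]
      rw [h0, ha] at hnc
      cases hnc
    · show (n : Int) < (n : Int) + k
      have : 1 ≤ k := Nat.one_le_iff_ne_zero.mpr hk0
      omega
  have hcp_mem : ∀ p ∈ cp, pvIsContig p.2 = true := by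
    intro p hp
    exact (List.mem_filter.mp hp).2
  have hC_mem : ∀ p ∈ C, pvIsContig p.2 = true := by
    intro p hp
    exact hcp_mem p ((PySem.List.mem_sorted _ _ _ _).mp hp)
  have hsp_mem : ∀ p ∈ sp, pvIsContig p.2 = false ∧ (n : Int) < p.1 := by
    intro p hp
    have h1 := (List.mem_filter.mp hp).2
    simp only [Bool.not_eq_eq_eq_not, Bool.not_true] at h1
    have h2 := hEt_mem p (List.mem_filter.mp hp).1
    exact ⟨h1, h2.2 h1⟩
  -- pairwise index facts
  have hEt_pw : Et.Pairwise (fun p q => p.1 < q.1) := PySem.List.pairwise_lt_enumerate _ _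
  have hcp_pw : cp.Pairwise (fun p q => p.1 < q.1) := hEt_pw.filter _
  have hsp_pw : sp.Pairwise (fun p q => p.1 < q.1) := hEt_pw.filter _
  have hEfp_pw : Efp.Pairwise (fun p q => p.1 < q.1) := PySem.List.pairwise_lt_enumerate _ _
  -- C is pairwise strictly increasing in the decorated key
  have hC_fst_ne : C.Pairwise (fun p q => p.1 ≠ q.1) := by
    have hnodup : (cp.map Prod.fst).Nodup :=
      (List.pairwise_map.mpr hcp_pw).imp ne_of_lt
    have hperm : (C.map Prod.fst).Perm (cp.map Prod.fst) :=
      (PySem.List.sorted_perm _ _ _).map _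
    exact List.pairwise_map.mp (hperm.nodup_iff.mpr hnodup)
  have hC_pw : C.Pairwise (fun p q => pvKeyB (n : Int) p < pvKeyB (n : Int) q) := by
    have hle := PySem.List.sorted_pairwise cp (pvKeyB (n : Int))
    refine (hle.and hC_fst_ne).imp_of_mem ?_
    intro p q hp hq ⟨h1, h2⟩
    refine lt_of_le_of_ne h1 ?_
    intro heq
    exact h2 (pvKeyB_contig_inj _ p q (hC_mem p hp) (hC_mem q hq) heq)
  -- the target arrangement
  have hperm : (Efp ++ (C ++ sp)).Perm (PySem.List.enumerate lines 0) := by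
    rw [hsplit]
    refine List.Perm.append_left Efp ?_
    exact ((PySem.List.sorted_perm _ _ _).append (List.Perm.refl sp)).trans
      (List.filter_append_perm _ Et)
  -- cross-block and in-block strict key ordering of the arrangement
  have hTpw : (Efp ++ (C ++ sp)).Pairwise
      (fun p q => pvKeyB (n : Int) p < pvKeyB (n : Int) q) := by
    rw [List.pairwise_append, List.pairwise_append]
    refine ⟨?_, ⟨hC_pw, ?_, ?_⟩, ?_⟩
    · refine hEfp_pw.imp_of_mem ?_
      intro p q hp hq hlt
      rw [pvKeyB_noncontig _ p (hEfp_mem p hp).1, pvKeyB_noncontig _ q (hEfp_mem q hq).1]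
      exact Prod.Lex.toLex_lt_toLex.mpr (Or.inl (Prod.Lex.toLex_lt_toLex.mpr (Or.inl hlt)))
    · refine hsp_pw.imp_of_mem ?_
      intro p q hp hq hlt
      rw [pvKeyB_noncontig _ p (hsp_mem p hp).1, pvKeyB_noncontig _ q (hsp_mem q hq).1]
      exact Prod.Lex.toLex_lt_toLex.mpr (Or.inl (Prod.Lex.toLex_lt_toLex.mpr (Or.inl hlt)))
    · intro p hp q hq
      rw [pvKeyB_contig _ p (hC_mem p hp), pvKeyB_noncontig _ q (hsp_mem q hq).1]
      exact Prod.Lex.toLex_lt_toLex.mpr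
        (Or.inl (Prod.Lex.toLex_lt_toLex.mpr (Or.inl (hsp_mem q hq).2)))
    · intro p hp q hq
      rcases List.mem_append.mp hq with hq | hq
      · rw [pvKeyB_noncontig _ p (hEfp_mem p hp).1, pvKeyB_contig _ q (hC_mem q hq)]
        exact Prod.Lex.toLex_lt_toLex.mpr
          (Or.inl (Prod.Lex.toLex_lt_toLex.mpr (Or.inl (hEfp_mem p hp).2.2)))
      · rw [pvKeyB_noncontig _ p (hEfp_mem p hp).1, pvKeyB_noncontig _ q (hsp_mem q hq).1]
        refine Prod.Lex.toLex_lt_toLex.mpr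
          (Or.inl (Prod.Lex.toLex_lt_toLex.mpr (Or.inl ?_)))
        exact lt_trans (hEfp_mem p hp).2.2 (hsp_mem q hq).2
  -- B's single sort produces exactly that arrangement
  have hsEq : PySem.List.sorted (PySem.List.enumerate lines 0) (pvKeyB (n : Int)) false
      = Efp ++ (C ++ sp) :=
    PySem.List.sorted_eq_of_perm_of_pairwise_lt _ _ _ hperm hTpw
  -- stability: the contig block is A's stable sort of the contig lines
  have hCmap : C.map Prod.snd
      = PySem.List.sorted (lines.filter (fun l => pvIsContig l)) pvSortKey false := by
    have h1 : C.map Prod.snd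
        = PySem.List.sorted (cp.map Prod.snd) pvSortKey false := by
      rw [hC, PySem.List.sorted_eq_foldl_insertBy, PySem.List.sorted_eq_foldl_insertBy]
      rw [List.foldl_map]
      exact pvFoldDec (n : Int) cp [] (by intro q h; simp at h) hcp_mem
        (by intro q h; simp at h) hcp_pw
    have h2 : cp.map Prod.snd = lines.filter (fun l => pvIsContig l) := by
      rw [hcp, pvMapSndFilter Et (fun l => pvIsContig l), hEt,
        PySem.List.map_snd_enumerate, hn, pvContigIdx_drop, pvFilter_dropWhile]
    rw [h1, h2]
  rw [hsEq]
  simp only [List.map_append, hCmap]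
  rw [hEfp, PySem.List.map_snd_enumerate, hn, pvContigIdx_take,
    hsp, pvMapSndFilter Et (fun l => !pvIsContig l), hEt,
    PySem.List.map_snd_enumerate, hn, pvContigIdx_drop, List.append_assoc]

-- ===== VERDICT (by name: the statement is the Claim_ definition above) =====
theorem parse_vcf_header_spec : Claim_equal_parse_vcf_header := by
  intro vcf_header _
  unfold Spec_parse_vcf_header parse_vcf_header parse_vcf_header_alt
  simp only [pvLoop_true, List.nil_append, pvSorted2_eq_sorted]
  exact (pvMain _).symm
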